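-- pv_equiv track=rewrite | github.com/RainbowDragon/ACSL | Python/Contest 4/2020 - 2021/GraphsJunior.py | find_characteristic
-- ===== SOURCE A (Python) =====
-- def find_characteristic(choice, edges):
--
--     graph = [[False for x in range(10)] for y in range(10)]
--
--     edge_list = edges.split(" ")
--     for k in range(len(edge_list)):
--         number = int(edge_list[k])
--         from_node = number // 10
--         to_node = number % 10
--         graph[from_node][to_node] = True
--
--     result = 0
--     if choice == 1:
--         count1 = 0
--         for x in range(1, 10):
--             if graph[x][x]:
--                 count1 += 1
--
--         count2 = 0
--         for x in range(1, 10):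
--             for y in range(1, 10):
--                 if x != y and graph[x][y] and graph[y][x]:
--                     count2 += 1
--         count2 //= 2
--
--         result = count1 + count2
--
--     elif choice == 2:
--         count = 0
--         max_index = 0
--         for x in range(1, 10):
--             current = 0
--             for y in range(1, 10):
--                 if graph[x][y]:
--                     current += 1
--
--             if current > count:
--                 count = current
--                 max_index = x
--
--         for z in range(1, 10):
--             if graph[max_index][z]:
--                 result += max_index*10 + z
--
--     elif choice == 3:
--         for x in range(1, 10):
--             for y in range(1, 10):
--                 for z in range(1, 10):
--                     if graph[x][y] and graph[y][z]:
--                         result += 1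
--
--     return result
-- ===== SOURCE B (Python) =====
-- def find_characteristic(choice, edges):
--
--     graph = [[False for x in range(10)] for y in range(10)]
--     for tok in edges.split(" "):
--         number = int(tok)
--         graph[number // 10][number % 10] = True
--
--     if choice == 1:
--         loops = sum(1 for x in range(1, 10) if graph[x][x])
--         mutual = sum(1 for x in range(1, 10) for y in range(x + 1, 10)
--                      if graph[x][y] and graph[y][x])
--         return loops + mutual
--     if choice == 2:
--         degs = [sum(1 for y in range(1, 10) if graph[x][y]) for x in range(1, 10)]
--         m = max(degs)
--         best = degs.index(m) + 1 if m > 0 else 0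
--         return sum(best * 10 + z for z in range(1, 10) if graph[best][z])
--     if choice == 3:
--         return sum(sum(1 for x in range(1, 10) if graph[x][y])
--                    * sum(1 for z in range(1, 10) if graph[y][z])
--                    for y in range(1, 10))
--     return 0
-- ===== Notes on version B (the rewrite author's own statement) =====
-- stated objective: alternative
-- what changed: Choice 3's O(n^3) triple loop over (x,y,z) is replaced by summing indegree(y)*outdegree(y) per node, choice 1's ordered-pair double count plus halving by direct enumeration of unordered pairs x<y, and choice 2's running-argmax state machine by building a degree list and using max()/index(); the matrix-building parse is unchanged.
import Mathlib
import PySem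

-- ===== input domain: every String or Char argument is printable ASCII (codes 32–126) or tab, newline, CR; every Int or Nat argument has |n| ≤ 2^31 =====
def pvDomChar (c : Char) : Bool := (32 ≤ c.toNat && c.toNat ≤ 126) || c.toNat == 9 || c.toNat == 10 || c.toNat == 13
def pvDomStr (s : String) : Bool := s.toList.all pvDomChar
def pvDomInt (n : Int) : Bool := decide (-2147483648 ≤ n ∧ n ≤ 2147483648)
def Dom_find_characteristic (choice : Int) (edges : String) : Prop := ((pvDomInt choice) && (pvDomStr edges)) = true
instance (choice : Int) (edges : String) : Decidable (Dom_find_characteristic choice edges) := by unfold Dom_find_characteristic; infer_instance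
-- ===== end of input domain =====

-- B replaces choice 3's triple loop by a per-node indegree*outdegree product, choice 1's
-- ordered-pair count + halving by direct enumeration of unordered pairs, and choice 2's
-- running-argmax state machine by max()/index() on a degree list (objective: alternative).

-- Shared by both ports (both Pythons contain the very same matrix-building assignment
-- 'graph[number // 10][number % 10] = True' and the same access 'graph[x][y]'):
-- Python index into a length-10 list; exact for -10 ≤ i ≤ 9 (guaranteed by Pre_ at every use).
def pyIdx10 (i : Int) : Nat := (if i < 0 then i + 10 else i).toNat

-- graph[x][y] for 0 ≤ x,y ≤ 9 (always in range: the matrix stays 10×10)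
def mat (g : List (List Bool)) (x y : Int) : Bool :=
  PySem.List.pyGetD (PySem.List.pyGetD g x []) y false

-- graph[number // 10][number % 10] = True   (number = int(tok))
def insertEdge (g : List (List Bool)) (t : String) : List (List Bool) :=
  let number := (PySem.Int.ofStr? t).getD 0   -- none = ValueError, excluded by Pre_
  let i := pyIdx10 (PySem.Int.floordiv number 10)
  let j := (PySem.Int.mod number 10).toNat    -- mod 10 is always in 0..9
  g.set i ((g.getD i []).set j true)

def initGraph : List (List Bool) :=
  (PySem.List.pyRange 0 10).map (fun _ => (PySem.List.pyRange 0 10).map (fun _ => false))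

-- ===== PORT A =====
-- A: for k in range(len(edge_list)): … edge_list[k] …
def buildA (el : List String) (g : List (List Bool)) : List (List Bool) :=
  (PySem.List.pyRange 0 (PySem.List.len el)).foldl
    (fun g k => insertEdge g (PySem.List.pyGetD el k "")) g

def find_characteristic (choice : Int) (edges : String) : Int :=
  let graph := buildA ((PySem.Str.split? edges " ").getD []) initGraph
  if choice == 1 then
    let count1 := (PySem.List.pyRange 1 10).foldl
      (fun c x => if mat graph x x then c + 1 else c) 0
    let count2 := (PySem.List.pyRange 1 10).foldl (fun c x =>
      (PySem.List.pyRange 1 10).foldl (fun c y =>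
        if x ≠ y ∧ mat graph x y = true ∧ mat graph y x = true then c + 1 else c) c) 0
    count1 + PySem.Int.floordiv count2 2
  else if choice == 2 then
    let s := (PySem.List.pyRange 1 10).foldl (fun (s : Int × Int) x =>
      let current := (PySem.List.pyRange 1 10).foldl
        (fun c y => if mat graph x y then c + 1 else c) 0
      if current > s.1 then (current, x) else s) (0, 0)
    (PySem.List.pyRange 1 10).foldl
      (fun r z => if mat graph s.2 z then r + (s.2 * 10 + z) else r) 0
  else if choice == 3 then
    (PySem.List.pyRange 1 10).foldl (fun r x =>
      (PySem.List.pyRange 1 10).foldl (fun r y =>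
        (PySem.List.pyRange 1 10).foldl (fun r z =>
          if mat graph x y = true ∧ mat graph y z = true then r + 1 else r) r) r) 0
  else 0

-- ===== PORT B =====
-- B: for tok in edges.split(" "):
def buildB (el : List String) (g : List (List Bool)) : List (List Bool) :=
  el.foldl insertEdge g

def outdegB (g : List (List Bool)) (x : Int) : Int :=
  ((PySem.List.pyRange 1 10).countP (fun y => mat g x y) : Int)

def indegB (g : List (List Bool)) (y : Int) : Int :=
  ((PySem.List.pyRange 1 10).countP (fun x => mat g x y) : Int)

def find_characteristic_alt (choice : Int) (edges : String) : Int :=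
  let graph := buildB ((PySem.Str.split? edges " ").getD []) initGraph
  if choice == 1 then
    let loops : Int := ((PySem.List.pyRange 1 10).countP (fun x => mat graph x x) : Int)
    let mutualPairs : Int := ((PySem.List.pyRange 1 10).map (fun x =>
      ((PySem.List.pyRange (x + 1) 10).countP
        (fun y => mat graph x y && mat graph y x) : Int))).sum
    loops + mutualPairs
  else if choice == 2 then
    let degs := (PySem.List.pyRange 1 10).map (fun x => outdegB graph x)
    let m := (PySem.List.max? degs (fun d => d)).getD 0   -- max(degs): degs is nonempty
    let best : Int := if m > 0 then ((PySem.List.index? degs m).getD 0 : Int) + 1 else 0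
    (((PySem.List.pyRange 1 10).filter (fun z => mat graph best z)).map
      (fun z => best * 10 + z)).sum
  else if choice == 3 then
    ((PySem.List.pyRange 1 10).map (fun y => indegB graph y * outdegB graph y)).sum
  else 0

-- ===== PRECONDITION & SPEC =====
-- Pre_ holds exactly where the Python A returns: every token of edges.split(" ") must parse
-- as an int (else ValueError) in -100..99 (else graph[number // 10] is an IndexError).
def Pre_find_characteristic (choice : Int) (edges : String) : Prop :=
  (((PySem.Str.split? edges " ").getD []).all (fun t =>
    match PySem.Int.ofStr? t with
    | some n => decide (-100 ≤ n ∧ n ≤ 99)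
    | none => false)) = true
instance (choice : Int) (edges : String) : Decidable (Pre_find_characteristic choice edges) := by
  unfold Pre_find_characteristic; infer_instance

def pvWitness_find_characteristic : Int × String := (3, "12 21 23 33")

def Spec_find_characteristic (choice : Int) (edges : String) (out : Int) : Prop := out = find_characteristic_alt choice edges
instance (choice : Int) (edges : String) (out : Int) : Decidable (Spec_find_characteristic choice edges out) := by unfold Spec_find_characteristic; infer_instance

-- ===== CLAIM (what is proved, stated in full; the proofs are below) =====
def Claim_equal_find_characteristic : Prop := ∀ (choice : Int) (edges : String), Dom_find_characteristic choice edges → Pre_find_characteristic choice edges → Spec_find_characteristic choice edges (find_characteristic choice edges)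

-- ===== LEMMAS AND PROOFS =====

lemma sum_swap_int (l l' : List Int) (f : Int → Int → Int) :
  (l.map (fun x => (l'.map (f x)).sum)).sum = (l'.map (fun y => (l.map (fun x => f x y)).sum)).sum := by
  induction l with
  | nil => simp
  | cons a t ih => simp [ih]

lemma sum_map_ite_const (l : List Int) (p : Int → Bool) (c : Int) :
  (l.map (fun x => if p x then c else 0)).sum = (l.countP p : Int) * c := by
  induction l with
  | nil => simp
  | cons a t ih => by_cases h : p a <;> simp [h, ih] <;> ring

lemma sum_map_ite_filter (l : List Int) (p : Int → Bool) (f : Int → Int) :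
    (l.map (fun x => if p x then f x else 0)).sum = ((l.filter p).map f).sum := by
  induction l with
  | nil => simp
  | cons a t ih => by_cases h : p a <;> simp [h, ih]

lemma argmax_spec (d : Int → Int) : ∀ (xs : List Int) (c m : Int),
    (xs.foldl (fun s x => if d x > s.1 then (d x, x) else s) (c, m)).1
      = (xs.map d).foldl max c ∧
    ((xs.foldl (fun s x => if d x > s.1 then (d x, x) else s) (c, m)).1 = c →
      xs.foldl (fun s x => if d x > s.1 then (d x, x) else s) (c, m) = (c, m)) ∧
    ((xs.foldl (fun s x => if d x > s.1 then (d x, x) else s) (c, m)).1 > c →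
      xs.find? (fun x => d x ==
        (xs.foldl (fun s x => if d x > s.1 then (d x, x) else s) (c, m)).1)
        = some (xs.foldl (fun s x => if d x > s.1 then (d x, x) else s) (c, m)).2) := by
  intro xs
  induction xs with
  | nil => intro c m; refine ⟨rfl, fun _ => rfl, fun h => absurd h (by simp)⟩
  | cons x t ih =>
    intro c m
    by_cases h : d x > c
    · have hstep : (x :: t).foldl (fun s x => if d x > s.1 then (d x, x) else s) (c, m)
          = t.foldl (fun s x => if d x > s.1 then (d x, x) else s) (d x, x) := by
        simp [h]
      obtain ⟨ih1, ih2, ih3⟩ := ih (d x) x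
      have hge : d x ≤ (t.foldl (fun s x => if d x > s.1 then (d x, x) else s) (d x, x)).1 := by
        rw [ih1]; exact (PySem.List.le_foldl_max (t.map d) (d x)).1
      refine ⟨?_, ?_, ?_⟩
      · rw [hstep, ih1]; simp [max_eq_right (le_of_lt h)]
      · intro hc; rw [hstep] at hc ⊢
        exfalso; omega
      · intro hgt
        rw [hstep] at hgt ⊢
        by_cases he : (t.foldl (fun s x => if d x > s.1 then (d x, x) else s) (d x, x)).1 = d x
        · have := ih2 he
          rw [List.find?_cons]
          simp [this]
        · have hlt : d x < (t.foldl (fun s x => if d x > s.1 then (d x, x) else s) (d x, x)).1 := by omega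
          rw [List.find?_cons]
          have hne : (d x == (t.foldl (fun s x => if d x > s.1 then (d x, x) else s) (d x, x)).1) = false := by
            rw [beq_eq_false_iff_ne]; exact ne_of_lt hlt
          simp only [hne]
          exact ih3 (by omega)
    · have hstep : (x :: t).foldl (fun s x => if d x > s.1 then (d x, x) else s) (c, m)
          = t.foldl (fun s x => if d x > s.1 then (d x, x) else s) (c, m) := by
        simp [h]
      obtain ⟨ih1, ih2, ih3⟩ := ih c m
      refine ⟨?_, ?_, ?_⟩
      · rw [hstep, ih1]; simp [max_eq_left (by omega : d x ≤ c)]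
      · intro hc; rw [hstep] at hc ⊢; exact ih2 hc
      · intro hgt
        rw [hstep] at hgt ⊢
        rw [List.find?_cons]
        have hne : (d x == (t.foldl (fun s x => if d x > s.1 then (d x, x) else s) (c, m)).1) = false := by
          rw [beq_eq_false_iff_ne]; exact ne_of_lt (by omega)
        simp only [hne]
        exact ih3 hgt

lemma find?_of_index?_map (d : Int → Int) : ∀ (xs : List Int) (v : Int) (k : Nat),
    PySem.List.index? (xs.map d) v = some k →
    ∃ h : k < xs.length, xs.find? (fun x => d x == v) = some xs[k] := by
  intro xs
  induction xs with
  | nil => intro v k h; simp [PySem.List.index?] at h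
  | cons x t ih =>
    intro v k h
    by_cases he : d x = v
    · subst he
      rw [List.map_cons, PySem.List.index?_cons_self] at h
      injection h with h'
      subst h'
      exact ⟨by simp, by simp⟩
    · rw [List.map_cons, PySem.List.index?_cons_of_ne (List.map d t) he] at h
      cases hk : PySem.List.index? (t.map d) v with
      | none => rw [hk] at h; simp at h
      | some k' =>
        rw [hk] at h
        simp only [Option.map_some] at h
        injection h with h'
        subst h'
        obtain ⟨hlt, hfind⟩ := ih v k' hk
        refine ⟨by simp [Nat.succ_lt_succ hlt], ?_⟩
        rw [List.find?_cons]
        have hne : (d x == v) = false := by simpa using he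
        simp only [hne]
        rw [hfind]
        simp

lemma rowsum_eq (g : List (List Bool)) (b : Int) :
    (PySem.List.pyRange 1 10).foldl (fun r z => if mat g b z then r + (b * 10 + z) else r) 0
    = (((PySem.List.pyRange 1 10).filter (fun z => mat g b z)).map (fun z => b * 10 + z)).sum := by
  have hstep : ∀ (r z : Int), (if mat g b z then r + (b * 10 + z) else r)
      = r + (if mat g b z then b * 10 + z else 0) := by
    intro r z; split <;> simp
  simp only [hstep, PySem.List.foldl_add, zero_add]
  exact sum_map_ite_filter _ _ _

lemma build_eq (el : List String) (g : List (List Bool)) : buildA el g = buildB el g := by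
  unfold buildA buildB
  rw [PySem.List.foldl_pyRange_pyGetD el "" insertEdge g le_rfl]
  simp

lemma choice1_eq (g : List (List Bool)) :
    (PySem.List.pyRange 1 10).foldl (fun c x => if mat g x x then c + 1 else c) 0 +
      PySem.Int.floordiv
        ((PySem.List.pyRange 1 10).foldl (fun c x =>
          (PySem.List.pyRange 1 10).foldl (fun c y =>
            if x ≠ y ∧ mat g x y = true ∧ mat g y x = true then c + 1 else c) c) 0) 2
    = ((PySem.List.pyRange 1 10).countP (fun x => mat g x x) : Int) +
      ((PySem.List.pyRange 1 10).map (fun x =>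
        ((PySem.List.pyRange (x + 1) 10).countP
          (fun y => mat g x y && mat g y x) : Int))).sum := by
  have key : ∀ a b : Int, a = b + b → PySem.Int.floordiv a 2 = b := by
    intro a b h; subst h; rw [PySem.Int.floordiv_eq_ediv_of_pos (by norm_num)]; omega
  rw [PySem.List.foldl_ite_add_one (fun x => mat g x x = true)]
  have hinner : ∀ (x c : Int),
      (PySem.List.pyRange 1 10).foldl (fun c y =>
        if x ≠ y ∧ mat g x y = true ∧ mat g y x = true then c + 1 else c) c
      = c + ((PySem.List.pyRange 1 10).countP
          (fun y => decide (x ≠ y ∧ mat g x y = true ∧ mat g y x = true)) : Int) := by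
    intro x c
    rw [PySem.List.foldl_ite_add_one (fun y => x ≠ y ∧ mat g x y = true ∧ mat g y x = true)]
  simp only [hinner, PySem.List.foldl_add, zero_add]
  congr 1
  · simp
  · apply key
    simp only [← PySem.List.sum_map_ite_one_zero]
    have hR : PySem.List.pyRange 1 10 = [1,2,3,4,5,6,7,8,9] := by decide
    have h2 : PySem.List.pyRange 2 10 = [2,3,4,5,6,7,8,9] := by decide
    have h3 : PySem.List.pyRange 3 10 = [3,4,5,6,7,8,9] := by decide
    have h4 : PySem.List.pyRange 4 10 = [4,5,6,7,8,9] := by decide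
    have h5 : PySem.List.pyRange 5 10 = [5,6,7,8,9] := by decide
    have h6 : PySem.List.pyRange 6 10 = [6,7,8,9] := by decide
    have h7 : PySem.List.pyRange 7 10 = [7,8,9] := by decide
    have h8 : PySem.List.pyRange 8 10 = [8,9] := by decide
    have h9 : PySem.List.pyRange 9 10 = [9] := by decide
    have h10 : PySem.List.pyRange 10 10 = [] := by decide
    simp only [hR]
    norm_num [h2,h3,h4,h5,h6,h7,h8,h9,h10, List.map, List.sum_cons, Bool.and_eq_true]
    simp only [and_comm]
    ring

lemma choice2_eq (g : List (List Bool)) :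
    (let s := (PySem.List.pyRange 1 10).foldl (fun (s : Int × Int) x =>
      let current := (PySem.List.pyRange 1 10).foldl
        (fun c y => if mat g x y then c + 1 else c) 0
      if current > s.1 then (current, x) else s) (0, 0)
    (PySem.List.pyRange 1 10).foldl
      (fun r z => if mat g s.2 z then r + (s.2 * 10 + z) else r) 0)
    = (let degs := (PySem.List.pyRange 1 10).map (fun x => outdegB g x)
      let m := (PySem.List.max? degs (fun d => d)).getD 0
      let best : Int := if m > 0 then ((PySem.List.index? degs m).getD 0 : Int) + 1 else 0
      (((PySem.List.pyRange 1 10).filter (fun z => mat g best z)).map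
        (fun z => best * 10 + z)).sum) := by
  have hcur : ∀ x : Int,
      (PySem.List.pyRange 1 10).foldl (fun c y => if mat g x y then c + 1 else c) 0
        = outdegB g x := by
    intro x
    rw [PySem.List.foldl_ite_add_one (fun y => mat g x y = true)]
    simp [outdegB]
  simp only [hcur]
  set d := outdegB g with hd
  set R := PySem.List.pyRange 1 10 with hRdef
  have hR : R = [1,2,3,4,5,6,7,8,9] := by decide
  obtain ⟨h1, h2, h3⟩ := argmax_spec d R 0 0
  set r := R.foldl (fun s x => if d x > s.1 then (d x, x) else s) (0, 0) with hr
  have hd0 : ∀ x, 0 ≤ d x := by intro x; simp [hd, outdegB]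
  have hdegs : R.map d = d 1 :: ([2,3,4,5,6,7,8,9] : List Int).map d := by
    rw [hR]; rfl
  have hmax : (PySem.List.max? (R.map d) (fun x => x)).getD 0
      = (([2,3,4,5,6,7,8,9] : List Int).map d).foldl max (d 1) := by
    rw [hdegs, PySem.List.max?_id_cons]; rfl
  have hr1 : r.1 = (([2,3,4,5,6,7,8,9] : List Int).map d).foldl max (d 1) := by
    rw [h1, hR]
    simp [max_eq_right (hd0 1)]
  set m := (PySem.List.max? (R.map d) (fun x => x)).getD 0 with hm
  have hrm : r.1 = m := by rw [hmax, hr1]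
  -- show the row index agrees
  have hbest : r.2 = (if m > 0 then ((PySem.List.index? (R.map d) m).getD 0 : Int) + 1 else 0) := by
    by_cases hpos : m > 0
    · have hmem : m ∈ R.map d := by
        apply PySem.List.max?_mem (key := fun x => x)
        rw [hdegs, PySem.List.max?_id_cons, hmax]
      have hsome : (PySem.List.index? (R.map d) m).isSome := by
        rw [PySem.List.index?_isSome_iff]; exact hmem
      obtain ⟨k, hk⟩ := Option.isSome_iff_exists.mp hsome
      obtain ⟨hklt, hfind⟩ := find?_of_index?_map d R m k hk
      have := h3 (by omega)
      rw [hrm] at this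
      rw [hfind] at this
      have hklt' : k < ([1,2,3,4,5,6,7,8,9] : List Int).length := by
        rw [← hR]; exact hklt
      have hlit : ([1,2,3,4,5,6,7,8,9] : List Int)[k]'hklt' = (k : Int) + 1 := by
        simp only [List.length_cons, List.length_nil] at hklt'
        interval_cases k <;> rfl
      have hRk : R[k] = (k : Int) + 1 := (List.getElem_of_eq hR hklt).trans hlit
      rw [if_pos hpos, hk]
      simp only [Option.getD_some]
      rw [← Option.some.inj this]; exact hRk
    · have hr0 : r.1 = 0 := by
        have : 0 ≤ r.1 := by rw [h1]; exact (PySem.List.le_foldl_max (R.map d) 0).1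
        omega
      have := h2 hr0
      rw [if_neg hpos, this]
  rw [rowsum_eq, hbest]

lemma choice3_eq (g : List (List Bool)) :
    (PySem.List.pyRange 1 10).foldl (fun r x =>
      (PySem.List.pyRange 1 10).foldl (fun r y =>
        (PySem.List.pyRange 1 10).foldl (fun r z =>
          if mat g x y = true ∧ mat g y z = true then r + 1 else r) r) r) 0
    = ((PySem.List.pyRange 1 10).map (fun y => indegB g y * outdegB g y)).sum := by
  have hinner : ∀ (x y r : Int),
      (PySem.List.pyRange 1 10).foldl (fun r z =>
          if mat g x y = true ∧ mat g y z = true then r + 1 else r) r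
      = r + (if mat g x y then ((PySem.List.pyRange 1 10).countP (fun z => mat g y z) : Int) else 0) := by
    intro x y r
    rw [PySem.List.foldl_ite_add_one (fun z => mat g x y = true ∧ mat g y z = true)]
    by_cases h : mat g x y <;> simp [h]
  simp only [hinner, PySem.List.foldl_add, zero_add]
  rw [sum_swap_int]
  simp only [sum_map_ite_const]
  simp [indegB, outdegB]

-- ===== VERDICT (by name: the statement is the Claim_ definition above) =====
theorem find_characteristic_spec : Claim_equal_find_characteristic := by
  intro choice edges _ _
  unfold Spec_find_characteristic find_characteristic find_characteristic_alt
  rw [build_eq]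
  set g := buildB ((PySem.Str.split? edges " ").getD []) initGraph with hg
  by_cases h1 : choice == 1
  · simp only [h1, if_pos rfl, if_true]
    exact choice1_eq g
  · by_cases h2 : choice == 2
    · simp only [h1, h2, Bool.false_eq_true, if_false, if_true]
      exact choice2_eq g
    · by_cases h3 : choice == 3
      · simp only [h1, h2, h3, Bool.false_eq_true, if_false, if_true]
        exact choice3_eq g
      · simp [h1, h2, h3]
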